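-- pv_equiv track=rewrite | github.com/anandphulwani/repo-file-to-ytvideo | libs/rot13_rot5.py | rot13_rot5
-- ===== SOURCE A (Python) =====
-- def rot13_rot5(text):
--     result = []
--     for char in text:
--         if char.isalpha():  # Apply ROT13
--             base = ord('A') if char.isupper() else ord('a')
--             result.append(chr(base + (ord(char) - base + 13) % 26))
--         elif char.isdigit():  # Apply ROT5
--             result.append(chr(ord('0') + (ord(char) - ord('0') + 5) % 10))
--         else:  # Keep other characters the same
--             result.append(char)
--     return ''.join(result)
-- ===== SOURCE B (Python) =====
-- def rot13_rot5(text):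
--     # Phase 1: build a codepoint translation table with explicit populating loops.
--     table = {}
--     upper = "ABCDEFGHIJKLMNOPQRSTUVWXYZ"
--     lower = "abcdefghijklmnopqrstuvwxyz"
--     digits = "0123456789"
--     for i in range(26):
--         table[ord(upper[i])] = upper[(i + 13) % 26]
--         table[ord(lower[i])] = lower[(i + 13) % 26]
--     for i in range(10):
--         table[ord(digits[i])] = digits[(i + 5) % 10]
--     # Phase 2: single table-lookup pass; unmapped characters stay unchanged.
--     return text.translate(table)
-- ===== Notes on version B (the rewrite author's own statement) =====
-- stated objective: faster
-- what changed: B precomputes a 62-entry codepoint->char translation table in a separate build phase and then does one branch-free str.translate lookup pass, instead of A's per-character isalpha/isupper/isdigit branching with ord/chr arithmetic and list appends on every character.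
import Mathlib
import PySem

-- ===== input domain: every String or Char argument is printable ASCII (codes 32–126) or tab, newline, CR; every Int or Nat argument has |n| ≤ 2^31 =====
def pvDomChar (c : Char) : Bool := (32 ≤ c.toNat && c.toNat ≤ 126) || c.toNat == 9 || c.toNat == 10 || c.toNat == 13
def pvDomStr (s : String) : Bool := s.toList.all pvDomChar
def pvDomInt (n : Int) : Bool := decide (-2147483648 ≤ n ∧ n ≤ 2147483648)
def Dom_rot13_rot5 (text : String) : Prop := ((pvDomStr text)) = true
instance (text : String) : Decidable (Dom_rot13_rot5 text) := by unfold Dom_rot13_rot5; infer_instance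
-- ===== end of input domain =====

-- B builds a codepoint translation table once and does one lookup pass (idiomatic two-phase rewrite of A's per-character branching).

-- ===== PORT A =====
-- one character of A's loop body (the appended piece)
def rot13_rot5_step (char : Char) : List Char :=
  if PySem.Chars.isalpha char then
    let base : Int := if PySem.Chars.isupper char then ((Char.toNat 'A' : Nat) : Int) else ((Char.toNat 'a' : Nat) : Int)
    -- chr: the argument is always a valid nonnegative codepoint here, so .toNat/Char.ofNat is exact
    [Char.ofNat (base + PySem.Int.mod (((char.toNat : Nat) : Int) - base + 13) 26).toNat]
  else if PySem.Chars.isdigit char then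
    [Char.ofNat (((Char.toNat '0' : Nat) : Int) + PySem.Int.mod (((char.toNat : Nat) : Int) - ((Char.toNat '0' : Nat) : Int) + 5) 10).toNat]
  else
    [char]

def rot13_rot5 (text : String) : String :=
  let result : List Char :=
    text.toList.foldl (fun result char => result ++ rot13_rot5_step char) []
  String.mk result

-- ===== PORT B =====
-- phase 1 of B: the translation table (codepoint → image character)
def rot13_rot5_table : PySem.Dict Int Char :=
  let upper := "ABCDEFGHIJKLMNOPQRSTUVWXYZ".toList
  let lower := "abcdefghijklmnopqrstuvwxyz".toList
  let digits := "0123456789".toList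
  -- string indexing is always in range here, so pyGetD with a dummy default is exact
  let t := (PySem.List.pyRange 0 26 1).foldl (fun t i =>
      (t.insert ((PySem.List.pyGetD upper i ' ').toNat : Int)
                (PySem.List.pyGetD upper (PySem.Int.mod (i + 13) 26) ' ')).insert
        ((PySem.List.pyGetD lower i ' ').toNat : Int)
        (PySem.List.pyGetD lower (PySem.Int.mod (i + 13) 26) ' ')) PySem.Dict.empty
  (PySem.List.pyRange 0 10 1).foldl (fun t i =>
      t.insert ((PySem.List.pyGetD digits i ' ').toNat : Int)
               (PySem.List.pyGetD digits (PySem.Int.mod (i + 5) 10) ' ')) t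

def rot13_rot5_alt (text : String) : String :=
  -- phase 2: str.translate — per character: mapped image if present, else the character itself
  String.mk (text.toList.map (fun c =>
    match rot13_rot5_table.get? ((c.toNat : Nat) : Int) with
    | some v => v
    | none => c))

-- ===== PRECONDITION & SPEC =====
def Spec_rot13_rot5 (text : String) (out : String) : Prop := out = rot13_rot5_alt text
instance (text : String) (out : String) : Decidable (Spec_rot13_rot5 text out) := by unfold Spec_rot13_rot5; infer_instance

-- ===== CLAIM (what is proved, stated in full; the proofs are below) =====
def Claim_equal_rot13_rot5 : Prop := ∀ (text : String), Dom_rot13_rot5 text → Spec_rot13_rot5 text (rot13_rot5 text)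

-- ===== LEMMAS AND PROOFS =====

-- the per-character B translation
def rot13_rot5_altStep (c : Char) : Char :=
  match rot13_rot5_table.get? ((c.toNat : Nat) : Int) with
  | some v => v
  | none => c

-- the two per-character functions agree on every codepoint below 128 (checked by computation)
set_option maxRecDepth 10000 in
set_option maxHeartbeats 1000000 in
theorem step_eq_fin : ∀ n : Fin 128, rot13_rot5_step (Char.ofNat n.val) = [rot13_rot5_altStep (Char.ofNat n.val)] := by decide

theorem step_eq (c : Char) (h : pvDomChar c = true) :
    rot13_rot5_step c = [rot13_rot5_altStep c] := by
  have hlt : c.toNat < 128 := by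
    simp [pvDomChar] at h
    omega
  have := step_eq_fin ⟨c.toNat, hlt⟩
  simpa [Char.ofNat_toNat] using this

theorem flat_eq (l : List Char) (h : l.all pvDomChar = true) :
    l.flatMap rot13_rot5_step = l.map rot13_rot5_altStep := by
  induction l with
  | nil => rfl
  | cons c t ih =>
    simp only [List.all_cons, Bool.and_eq_true] at h
    simp [List.flatMap_cons, step_eq c h.1, ih h.2]

-- ===== VERDICT (by name: the statement is the Claim_ definition above) =====
set_option maxRecDepth 10000 in
theorem rot13_rot5_spec : Claim_equal_rot13_rot5 := by
  intro text hdom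
  unfold Spec_rot13_rot5 rot13_rot5 rot13_rot5_alt
  have := PySem.List.foldl_append_eq_flatMap (g := rot13_rot5_step) (l := text.toList) (acc := ([] : List Char))
  rw [this, flat_eq text.toList hdom]
  rfl
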